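-- pv_equiv track=rewrite | github.com/alsatianco/binturong | tests/oracle/test_text_tools.py | _alternating_preserve
-- ===== SOURCE A (Python) =====
-- def _alternating_preserve(text: str) -> str:
--     lower = text.lower()
--     should_upper = False
--     out = []
--     for ch in lower:
--         if ch.isalpha():
--             if should_upper:
--                 out.append(ch.upper())
--             else:
--                 out.append(ch)
--             should_upper = not should_upper
--         else:
--             out.append(ch)
--             should_upper = False
--     return "".join(out)
-- ===== SOURCE B (Python) =====
-- def _alternating_preserve(text: str) -> str:
--     lower = text.lower()
--     n = len(lower)
--     pieces = []
--     i = 0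
--     while i < n:
--         k = lower[i].isalpha()
--         j = i
--         while j < n and lower[j].isalpha() == k:
--             j += 1
--         run = lower[i:j]
--         if k:
--             pieces.append(''.join(ch.upper() if p % 2 == 1 else ch for p, ch in enumerate(run)))
--         else:
--             pieces.append(run)
--         i = j
--     return ''.join(pieces)
-- ===== Notes on version B (the rewrite author's own statement) =====
-- stated objective: alternative
-- what changed: B replaces A's single pass with a mutable should_upper flag by a run-based scan: it splits the lowered string into maximal alpha/non-alpha runs and uppercases the odd-indexed characters of each alpha run, so the reset is expressed by run boundaries instead of flag state.
import Mathlib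
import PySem

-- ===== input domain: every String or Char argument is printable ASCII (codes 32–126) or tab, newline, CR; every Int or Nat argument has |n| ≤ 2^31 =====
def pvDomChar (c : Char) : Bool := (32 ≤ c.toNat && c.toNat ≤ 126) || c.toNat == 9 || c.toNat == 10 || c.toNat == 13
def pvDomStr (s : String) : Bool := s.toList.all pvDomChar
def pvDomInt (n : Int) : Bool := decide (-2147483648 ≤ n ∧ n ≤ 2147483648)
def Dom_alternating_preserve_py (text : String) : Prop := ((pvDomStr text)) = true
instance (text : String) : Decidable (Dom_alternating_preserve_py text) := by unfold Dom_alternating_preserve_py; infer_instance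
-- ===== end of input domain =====

-- B replaces A's single pass with a mutable flag by a run-based scan over maximal
-- alpha/non-alpha runs of the lowered string (objective: alternative decomposition).

-- ===== PORT A =====
-- the loop body of A: state = (out, should_upper)
def pvStepA (acc : List Char × Bool) (ch : Char) : List Char × Bool :=
  if PySem.Chars.isalpha ch then
    (acc.1 ++ [if acc.2 then PySem.Chars.upperChar ch else ch], !acc.2)
  else
    (acc.1 ++ [ch], false)

def alternating_preserve_py (text : String) : String :=
  let lower := (PySem.Str.lower text).toList
  let st := lower.foldl pvStepA ([], false)
  String.mk st.1

-- ===== PORT B =====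
-- maximal runs of the list keyed by isalpha (port of Source B's inner while-scan)
def pvGroups : List Char → List (Bool × List Char)
  | [] => []
  | c :: cs =>
    let k := PySem.Chars.isalpha c
    (k, c :: cs.takeWhile (fun d => PySem.Chars.isalpha d == k)) ::
      pvGroups (cs.dropWhile (fun d => PySem.Chars.isalpha d == k))
termination_by cs => cs.length
decreasing_by
  exact Nat.lt_succ_of_le (List.length_dropWhile_le _ _)

-- render one run: alpha runs get odd indices uppercased, others pass through
def pvRender (g : Bool × List Char) : List Char :=
  if g.1 then g.2.zipIdx.map (fun p => if p.2 % 2 == 1 then PySem.Chars.upperChar p.1 else p.1)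
  else g.2

def alternating_preserve_py_alt (text : String) : String :=
  String.mk (((pvGroups (PySem.Str.lower text).toList).map pvRender).flatten)

-- ===== PRECONDITION & SPEC =====
def Spec_alternating_preserve_py (text : String) (out : String) : Prop := out = alternating_preserve_py_alt text
instance (text : String) (out : String) : Decidable (Spec_alternating_preserve_py text out) := by unfold Spec_alternating_preserve_py; infer_instance

-- ===== CLAIM (what is proved, stated in full; the proofs are below) =====
def Claim_equal_alternating_preserve_py : Prop := ∀ (text : String), Dom_alternating_preserve_py text → Spec_alternating_preserve_py text (alternating_preserve_py text)

-- ===== LEMMAS AND PROOFS =====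

-- A's loop as structural recursion
def pvProcA (b : Bool) : List Char → List Char
  | [] => []
  | c :: cs =>
    if PySem.Chars.isalpha c then
      (if b then PySem.Chars.upperChar c else c) :: pvProcA (!b) cs
    else
      c :: pvProcA false cs

theorem pvFoldl_fst (cs : List Char) (acc : List Char) (b : Bool) :
    (cs.foldl pvStepA (acc, b)).1 = acc ++ pvProcA b cs := by
  induction cs generalizing acc b with
  | nil => simp [pvProcA]
  | cons c cs ih =>
    by_cases h : PySem.Chars.isalpha c = true
    · simp [List.foldl_cons, pvStepA, h, pvProcA, ih]
    · simp [List.foldl_cons, pvStepA, h, pvProcA, ih]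

theorem pvParity (n : Nat) : ((n + 1) % 2 == 1) = !(n % 2 == 1) := by
  rcases Nat.mod_two_eq_zero_or_one n with h | h <;> simp [Nat.add_mod, h]

-- A's flag-marking on an alpha run equals B's index-parity rendering
def pvMark (b : Bool) : List Char → List Char
  | [] => []
  | c :: cs => (if b then PySem.Chars.upperChar c else c) :: pvMark (!b) cs

theorem pvMark_zipIdx (run : List Char) (n : Nat) :
    (run.zipIdx n).map (fun p => if p.2 % 2 == 1 then PySem.Chars.upperChar p.1 else p.1)
      = pvMark (n % 2 == 1) run := by
  induction run generalizing n with
  | nil => simp [pvMark]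
  | cons c cs ih =>
    simp only [List.zipIdx_cons, List.map_cons, pvMark, ih (n + 1), pvParity n]

-- processing an all-alpha run
theorem pvProcA_alpha (run rest : List Char) (b : Bool)
    (h : ∀ c ∈ run, PySem.Chars.isalpha c = true) :
    pvProcA b (run ++ rest) = pvMark b run ++ pvProcA (b ^^ (run.length % 2 == 1)) rest := by
  induction run generalizing b with
  | nil => simp [pvMark]
  | cons c cs ih =>
    have hc := h c (by simp)
    simp only [List.cons_append, pvProcA, hc, if_pos, pvMark, List.length_cons]
    rw [ih (!b) (fun d hd => h d (List.mem_cons_of_mem _ hd))]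
    have hb : ((!b) ^^ (cs.length % 2 == 1)) = (b ^^ ((cs.length + 1) % 2 == 1)) := by
      rw [pvParity]; cases b <;> cases (cs.length % 2 == 1) <;> rfl
    rw [hb]

-- processing an all-non-alpha run (state resets to false on each char)
theorem pvProcA_nonalpha (run rest : List Char) (b : Bool)
    (h : ∀ c ∈ run, PySem.Chars.isalpha c = false) (hne : run ≠ [] ∨ b = false) :
    pvProcA b (run ++ rest) = run ++ pvProcA false rest := by
  induction run generalizing b with
  | nil =>
    rcases hne with h' | h'
    · exact absurd rfl h'
    · simp [h']
  | cons c cs ih =>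
    have hc := h c (by simp)
    simp only [List.cons_append, pvProcA, hc, Bool.false_eq_true]
    rw [ih false (fun d hd => h d (List.mem_cons_of_mem _ hd)) (Or.inr rfl)]
    simp

-- state reset at a run boundary: next char is non-alpha (or list empty)
theorem pvProcA_reset (rest : List Char) (b : Bool)
    (h : ∀ c ∈ rest.head?, PySem.Chars.isalpha c = false) :
    pvProcA b rest = pvProcA false rest := by
  cases rest with
  | nil => rfl
  | cons c cs => simp [pvProcA, h c rfl]

-- the head of dropWhile fails the predicate
theorem pvDropHead {p : Char → Bool} (l : List Char) (c : Char)
    (h : c ∈ (l.dropWhile p).head?) : p c = false := by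
  induction l with
  | nil => simp at h
  | cons d ds ih =>
    rw [List.dropWhile_cons] at h
    by_cases hd : p d = true
    · rw [if_pos hd] at h; exact ih h
    · rw [if_neg hd] at h
      simp only [List.head?_cons, Option.mem_def, Option.some.injEq] at h
      subst h; exact Bool.eq_false_iff.mpr hd

theorem pvMain (cs : List Char) :
    pvProcA false cs = ((pvGroups cs).map pvRender).flatten := by
  induction cs using pvGroups.induct with
  | case1 => simp [pvProcA, pvGroups]
  | case2 c cs k ih =>
    rw [pvGroups]
    simp only [List.map_cons, List.flatten_cons]
    have hsplit : c :: cs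
        = (c :: cs.takeWhile (fun d => PySem.Chars.isalpha d == k))
          ++ cs.dropWhile (fun d => PySem.Chars.isalpha d == k) := by
      simp [List.takeWhile_append_dropWhile]
    set rest := cs.dropWhile (fun d => PySem.Chars.isalpha d == k) with hrest
    have hreset : ∀ d ∈ rest.head?, PySem.Chars.isalpha d = false ∨ PySem.Chars.isalpha d ≠ k := by
      intro d hd
      have := pvDropHead (p := fun d => PySem.Chars.isalpha d == k) cs d hd
      right; exact fun he => by simp [he] at this
    by_cases hk : k = true
    · -- alpha run
      have halpha : ∀ d ∈ c :: cs.takeWhile (fun d => PySem.Chars.isalpha d == k),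
          PySem.Chars.isalpha d = true := by
        intro d hd
        rcases List.mem_cons.mp hd with h | h
        · subst h; exact hk ▸ rfl
        · have := List.mem_takeWhile_imp h
          simpa [hk] using this
      rw [hsplit, pvProcA_alpha _ _ _ halpha]
      have hrend : pvRender (k, c :: cs.takeWhile (fun d => PySem.Chars.isalpha d == k))
          = pvMark false (c :: cs.takeWhile (fun d => PySem.Chars.isalpha d == k)) := by
        simp only [pvRender, hk, if_pos]
        have := pvMark_zipIdx (c :: cs.takeWhile (fun d => PySem.Chars.isalpha d == true)) 0
        simpa using this
      rw [hrend, ← ih]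
      congr 1
      apply pvProcA_reset
      intro d hd
      rcases hreset d hd with h | h
      · exact h
      · cases hh : PySem.Chars.isalpha d
        · rfl
        · exact absurd (hk ▸ hh) h
    · -- non-alpha run
      have hk' : k = false := Bool.eq_false_iff.mpr hk
      have hna : ∀ d ∈ c :: cs.takeWhile (fun d => PySem.Chars.isalpha d == k),
          PySem.Chars.isalpha d = false := by
        intro d hd
        rcases List.mem_cons.mp hd with h | h
        · subst h; exact hk' ▸ rfl
        · have := List.mem_takeWhile_imp h
          simpa [hk'] using this
      have hc : PySem.Chars.isalpha c = false := hk'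
      rw [hsplit, pvProcA_nonalpha _ _ _ hna (Or.inr rfl), ← ih]
      simp [pvRender, hc, hk']

-- ===== VERDICT (by name: the statement is the Claim_ definition above) =====
theorem alternating_preserve_py_spec : Claim_equal_alternating_preserve_py := by
  intro text _
  unfold Spec_alternating_preserve_py alternating_preserve_py alternating_preserve_py_alt
  show String.mk ((List.foldl pvStepA ([], false) (PySem.Str.lower text).toList).1)
      = String.mk ((List.map pvRender (pvGroups (PySem.Str.lower text).toList)).flatten)
  rw [pvFoldl_fst ((PySem.Str.lower text).toList) [] false, List.nil_append, pvMain]
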